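-- pv_equiv track=rewrite | github.com/Elieren/secret_chat | client.py | decrypted_v2
-- ===== SOURCE A (Python) =====
-- def decrypted_v2(message_v3):
--     e = 0
--     g = 0
--     b = []
--     c = []
--     for x in message_v3:
--         b.append(x)
--     l = len(b)
--     while e < l:
--         try:
--             c.append(b[g])
--             g += 2
--             e += 1
--         except:
--             e += 1
--             continue
--     e = 0
--     if (l % 2) != 0:
--         g = 2
--     else:
--         g = 1
--     while e < l:
--         try:
--             c.append(b[-g])
--             g += 2
--             e += 1
--         except:
--             e += 1
--             continue
--     c = ("".join(c))
--     return c
-- ===== SOURCE B (Python) =====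
-- def decrypted_v2(message_v3):
--     evens = []
--     odds = []
--     even = True
--     for ch in message_v3:
--         if even:
--             evens.append(ch)
--         else:
--             odds.append(ch)
--         even = not even
--     return "".join(evens + odds[::-1])
-- ===== Notes on version B (the rewrite author's own statement) =====
-- stated objective: simpler
-- what changed: Replaces A's two index-driven exception-bounded while loops (even indices by positive index, then odd indices by negative index with parity-dependent start) with one linear pass that partitions characters by a toggling parity flag, then joins evens plus reversed odds.
import Mathlib
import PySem

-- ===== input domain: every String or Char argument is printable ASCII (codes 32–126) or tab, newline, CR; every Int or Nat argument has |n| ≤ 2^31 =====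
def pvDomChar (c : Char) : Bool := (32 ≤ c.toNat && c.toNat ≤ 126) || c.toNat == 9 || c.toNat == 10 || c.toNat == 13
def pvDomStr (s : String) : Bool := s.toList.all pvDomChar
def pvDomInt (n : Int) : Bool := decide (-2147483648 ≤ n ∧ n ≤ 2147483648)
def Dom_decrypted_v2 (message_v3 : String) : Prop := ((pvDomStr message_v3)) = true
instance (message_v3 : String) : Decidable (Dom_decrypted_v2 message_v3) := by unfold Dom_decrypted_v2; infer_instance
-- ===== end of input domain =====

-- B replaces A's two exception-bounded index scans with one parity-partition pass plus a reversal (simpler, same O(n) value).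

-- ===== PORT A =====
-- first while loop: e counts to l; on success c.append(b[g]); g += 2; on IndexError only e advances
def loopA (b : List Char) : Nat → Nat → List Char → List Char
  | 0, _, c => c
  | n+1, g, c =>
    match PySem.List.pyGet? b (g : Int) with
    | some x => loopA b n (g+2) (c ++ [x])
    | none => loopA b n g c

-- second while loop: same shape with negative index b[-g]
def loopB (b : List Char) : Nat → Nat → List Char → List Char
  | 0, _, c => c
  | n+1, g, c =>
    match PySem.List.pyGet? b (-(g : Int)) with
    | some x => loopB b n (g+2) (c ++ [x])
    | none => loopB b n g c

def decrypted_v2 (message_v3 : String) : String :=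
  let b := message_v3.toList.foldl (fun acc x => acc ++ [x]) []
  let l := b.length
  let c := loopA b l 0 []
  let g := if l % 2 ≠ 0 then 2 else 1
  let c := loopB b l g c
  String.mk c

-- ===== PORT B =====
def decrypted_v2_alt (message_v3 : String) : String :=
  let r := message_v3.toList.foldl
    (fun acc ch =>
      let (even, evens, odds) := acc
      if even then (!even, evens ++ [ch], odds) else (!even, evens, odds ++ [ch]))
    (true, ([] : List Char), ([] : List Char))
  String.mk (r.2.1 ++ r.2.2.reverse)

-- ===== PRECONDITION & SPEC =====
def Spec_decrypted_v2 (message_v3 : String) (out : String) : Prop := out = decrypted_v2_alt message_v3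
instance (message_v3 : String) (out : String) : Decidable (Spec_decrypted_v2 message_v3 out) := by unfold Spec_decrypted_v2; infer_instance

-- ===== CLAIM (what is proved, stated in full; the proofs are below) =====
def Claim_equal_decrypted_v2 : Prop := ∀ (message_v3 : String), Dom_decrypted_v2 message_v3 → Spec_decrypted_v2 message_v3 (decrypted_v2 message_v3)

-- ===== LEMMAS AND PROOFS =====

mutual
def evensOf : List Char → List Char
  | [] => []
  | a :: t => a :: oddsOf t
def oddsOf : List Char → List Char
  | [] => []
  | _ :: t => evensOf t
end

def upFrom (b : List Char) (g : Nat) : List Char :=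
  if h : g < b.length then b[g] :: upFrom b (g+2) else []
termination_by b.length - g
decreasing_by omega

def downFrom (b : List Char) (g : Nat) : List Char :=
  if h : 1 ≤ g ∧ g ≤ b.length then b[b.length - g]'(by omega) :: downFrom b (g+2) else []
termination_by b.length + 2 - g
decreasing_by omega

lemma foldl_append_id (t : List Char) (init : List Char) :
    t.foldl (fun acc x => acc ++ [x]) init = init ++ t := by
  induction t generalizing init with
  | nil => simp
  | cons a t ih => simp [List.foldl, ih]

lemma oddsOf_eq_evensOf_drop_one (t : List Char) : oddsOf t = evensOf (t.drop 1) := by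
  cases t <;> simp [oddsOf, evensOf]

lemma upFrom_eq (b : List Char) : ∀ (n g : Nat), b.length - g ≤ n → upFrom b g = evensOf (b.drop g) := by
  intro n
  induction n with
  | zero =>
    intro g hn
    have h : ¬ g < b.length := by omega
    rw [upFrom]
    simp [h, List.drop_eq_nil_of_le (by omega : b.length ≤ g), evensOf]
  | succ n ih =>
    intro g hn
    by_cases h : g < b.length
    · rw [upFrom]
      rw [List.drop_eq_getElem_cons h]
      simp only [h, dif_pos, evensOf]
      rw [ih (g+2) (by omega), oddsOf_eq_evensOf_drop_one, List.drop_drop]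
    · rw [upFrom]
      simp [h, List.drop_eq_nil_of_le (by omega : b.length ≤ g), evensOf]

lemma loopA_eq (b : List Char) : ∀ (n g : Nat) (c : List Char),
    b.length ≤ 2*n + g → loopA b n g c = c ++ upFrom b g := by
  intro n
  induction n with
  | zero =>
    intro g c h
    rw [loopA, upFrom]
    have : ¬ g < b.length := by omega
    simp [this]
  | succ n ih =>
    intro g c h
    rw [loopA]
    by_cases hg : g < b.length
    · rw [PySem.List.pyGet?_natCast]
      simp only [List.getElem?_eq_getElem hg]
      rw [ih (g+2) (c ++ [b[g]]) (by omega)]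
      conv_rhs => rw [upFrom]
      simp [hg]
    · rw [PySem.List.pyGet?_natCast]
      simp only [List.getElem?_eq_none (by omega : b.length ≤ g)]
      rw [ih g c (by omega)]

lemma loopB_eq (b : List Char) : ∀ (n g : Nat) (c : List Char), 1 ≤ g →
    (b.length + 2 ≤ 2*n + g ∨ b.length < g) → loopB b n g c = c ++ downFrom b g := by
  intro n
  induction n with
  | zero =>
    intro g c h1 h
    have hg : b.length < g := by omega
    rw [loopB, downFrom]
    have : ¬ (1 ≤ g ∧ g ≤ b.length) := by omega
    simp [this]
  | succ n ih =>
    intro g c h1 h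
    rw [loopB]
    by_cases hg : g ≤ b.length
    · rw [PySem.List.pyGet?_neg_natCast b g h1 hg]
      simp only [List.getElem?_eq_getElem (by omega : b.length - g < b.length)]
      rw [ih (g+2) (c ++ [b[b.length - g]]) (by omega) (by omega)]
      conv_rhs => rw [downFrom]
      have hcond : 1 ≤ g ∧ g ≤ b.length := ⟨h1, hg⟩
      simp [hcond]
    · have hnone : PySem.List.pyGet? b (-(g : Int)) = none := by
        rw [PySem.List.pyGet?_eq_none_iff]
        simp [PySem.Raise.InRange]
        omega
      rw [hnone]
      rw [ih g c h1 (Or.inr (by omega))]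

-- appending the element at index j to the even/odd-index sublist of a prefix
lemma take_succ_parity (b : List Char) : ∀ (j : Nat) (hj : j < b.length),
    (j % 2 = 0 → evensOf (b.take (j+1)) = evensOf (b.take (j-1)) ++ [b[j]])
  ∧ (j % 2 = 1 → oddsOf (b.take (j+1)) = oddsOf (b.take (j-1)) ++ [b[j]]) := by
  induction b with
  | nil => intro j hj; simp at hj
  | cons a t ih =>
    intro j hj
    constructor
    · intro hpar
      match j, hpar with
      | 0, _ => simp [evensOf, oddsOf]
      | (k+1), hpar =>
        have hk : k % 2 = 1 := by omega
        have hkt : k < t.length := by simpa using hj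
        have hodd := (ih k hkt).2 hk
        have hk1 : 1 ≤ k := by omega
        rw [show k + 1 - 1 = (k - 1) + 1 by omega]
        rw [List.take_succ_cons, List.take_succ_cons]
        simp only [evensOf, List.cons_append, List.getElem_cons_succ]
        rw [hodd]
    · intro hpar
      match j, hpar with
      | (k+1), hpar =>
        have hk : k % 2 = 0 := by omega
        have hkt : k < t.length := by simpa using hj
        have heven := (ih k hkt).1 hk
        rw [List.take_succ_cons]
        simp only [oddsOf, List.getElem_cons_succ]
        match k, hk, hkt, heven with
        | 0, _, hkt, heven =>
          simp only [Nat.zero_add, Nat.sub_self, List.take_zero, oddsOf, List.nil_append]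
          simpa [evensOf, oddsOf] using heven
        | (m+1), hk, hkt, heven =>
          rw [show m + 1 + 1 - 1 = m + 1 by omega, List.take_succ_cons]
          simp only [oddsOf]
          rw [show m + 1 - 1 = m by omega] at heven
          exact heven

-- dropping a final even index does not change the odd sublist, and conversely
lemma take_pred_parity : ∀ (b : List Char),
    (b.length % 2 = 1 → oddsOf (b.take (b.length - 1)) = oddsOf b)
  ∧ (b.length % 2 = 0 → evensOf (b.take (b.length - 1)) = evensOf b) := by
  intro b
  induction b with
  | nil => simp [oddsOf, evensOf]
  | cons a t ih =>
    constructor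
    · intro hpar
      have ht : t.length % 2 = 0 := by simp at hpar; omega
      simp only [List.length_cons, Nat.add_sub_cancel]
      match t, ht, ih with
      | [], _, _ => simp [oddsOf, evensOf]
      | (x :: t'), ht, ih =>
        rw [show (x :: t').length = t'.length + 1 from rfl, List.take_succ_cons]
        simp only [oddsOf]
        rw [show t'.length = (x :: t').length - 1 from rfl]
        exact ih.2 ht
    · intro hpar
      have ht : t.length % 2 = 1 := by simp at hpar; omega
      have htpos : 1 ≤ t.length := by omega
      simp only [List.length_cons, Nat.add_sub_cancel]
      match t, ht, ih, htpos with
      | (x :: t'), ht, ih, _ =>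
        rw [show (x :: t').length = t'.length + 1 from rfl, List.take_succ_cons]
        simp only [evensOf]
        rw [show t'.length = (x :: t').length - 1 from rfl]
        rw [ih.1 ht]

lemma downFrom_eq (b : List Char) : ∀ (n g : Nat), b.length + 2 - g ≤ n → 1 ≤ g →
    (b.length < g ∨ (b.length - g) % 2 = 1) →
    downFrom b g = (oddsOf (b.take (b.length + 1 - g))).reverse := by
  intro n
  induction n with
  | zero =>
    intro g hn h1 h
    have hg : b.length < g := by omega
    rw [downFrom]
    have : ¬ (1 ≤ g ∧ g ≤ b.length) := by omega
    simp [this]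
    rw [show b.length + 1 - g = 0 by omega]
    simp [oddsOf]
  | succ n ih =>
    intro g hn h1 h
    by_cases hg : g ≤ b.length
    · have hpar : (b.length - g) % 2 = 1 := by rcases h with h | h; omega; exact h
      rw [downFrom]
      have hc : 1 ≤ g ∧ g ≤ b.length := ⟨h1, hg⟩
      simp only [hc, and_self, dif_pos]
      rw [ih (g+2) (by omega) (by omega) (by omega)]
      have hjl : b.length - g < b.length := by omega
      have := (take_succ_parity b (b.length - g) hjl).2 hpar
      rw [show b.length + 1 - g = (b.length - g) + 1 by omega, this]
      rw [show b.length + 1 - (g + 2) = b.length - g - 1 by omega]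
      simp
    · rw [downFrom]
      have : ¬ (1 ≤ g ∧ g ≤ b.length) := by omega
      simp [this]
      rw [show b.length + 1 - g = 0 by omega]
      simp [oddsOf]

lemma fold_partition (t : List Char) : ∀ (ev : Bool) (es os : List Char),
    (t.foldl
      (fun acc ch =>
        let (even, evens, odds) := acc
        if even then (!even, evens ++ [ch], odds) else (!even, evens, odds ++ [ch]))
      (ev, es, os)).2
    = if ev then (es ++ evensOf t, os ++ oddsOf t) else (es ++ oddsOf t, os ++ evensOf t) := by
  induction t with
  | nil => intro ev es os; cases ev <;> simp [evensOf, oddsOf]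
  | cons a t ih =>
    intro ev es os
    cases ev <;> simp [List.foldl_cons, ih, evensOf, oddsOf, List.append_assoc]

-- ===== VERDICT (by name: the statement is the Claim_ definition above) =====
theorem decrypted_v2_spec : Claim_equal_decrypted_v2 := by
  intro m _
  unfold Spec_decrypted_v2 decrypted_v2 decrypted_v2_alt
  simp only [foldl_append_id, List.nil_append]
  set b := m.toList with hb
  set l := b.length with hl
  rw [fold_partition]
  simp only [if_true, List.nil_append]
  rw [loopA_eq b l 0 [] (by omega), upFrom_eq b l 0 (by omega), List.drop_zero, List.nil_append]
  by_cases hpar : l % 2 ≠ 0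
  · rw [if_pos hpar]
    rw [loopB_eq b l 2 (evensOf b) (by omega) (by omega)]
    congr 1
    rcases Nat.lt_or_ge l 2 with hsmall | hbig
    · rw [downFrom_eq b (l+2) 2 (by omega) (by omega) (Or.inl (by omega))]
      rw [show l + 1 - 2 = 0 by omega]
      have hb1 : b.length = 1 := by omega
      rcases b with _ | ⟨x, t⟩
      · simp at hb1
      · have ht : t = [] := by simpa using hb1
        subst ht
        simp [oddsOf, evensOf]
    · rw [downFrom_eq b (l+2) 2 (by omega) (by omega) (Or.inr (by omega))]
      rw [show b.length + 1 - 2 = b.length - 1 by omega]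
      rw [(take_pred_parity b).1 (by omega)]
  · rw [if_neg hpar]
    rw [loopB_eq b l 1 (evensOf b) (by omega) (by omega)]
    congr 1
    rcases Nat.eq_zero_or_pos l with h0 | hpos
    · rw [downFrom_eq b (l+2) 1 (by omega) (by omega) (Or.inl (by omega))]
      rw [show b.length + 1 - 1 = b.length by omega, List.take_length]
    · rw [downFrom_eq b (l+2) 1 (by omega) (by omega) (Or.inr (by omega))]
      rw [show b.length + 1 - 1 = b.length by omega, List.take_length]
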